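-- pv_equiv track=rewrite | github.com/Ukasz11233/Algorithms | Algorytmy/Kolokwium_poprawkowe II/Zadanie1.py | dominance_utility
-- ===== SOURCE A (Python) =====
-- def dominance_utility(P):
--     size = len(P)
--     if size > 1:
--         mid = size//2
--         left_array = dominance_utility(P[:mid])
--         right_array = dominance_utility(P[mid:])
--         result = []
--         p, q = 0, 0
--
--         while p < len(left_array) and q < len(right_array):
--             if left_array[p][0] <= right_array[q][0]:
--                 result.append(left_array[p])
--                 right_array = right_array[:q]
--                 p += 1
--             else:
--                 result.append(right_array[q])
--                 q += 1
--         while p < len(left_array):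
--             result.append(left_array[p])
--             p += 1
--
--         while q < len(right_array):
--             result.append(right_array[q])
--             q += 1
--
--         return result
--     return P
-- ===== SOURCE B (Python) =====
-- def dominance_utility(P):
--     if len(P) <= 1:
--         return P
--     mid = len(P) // 2
--     left = dominance_utility(P[:mid])
--     right = dominance_utility(P[mid:])
--     k = 0
--     while k < len(right) and right[k][0] < left[0][0]:
--         k += 1
--     return right[:k] + left
-- ===== Notes on version B (the rewrite author's own statement) =====
-- stated objective: simpler
-- what changed: B replaces the two-pointer merge loop with in-place truncation of right_array by a single forward scan counting leading right elements whose key is below left[0][0], returning right[:k] + left.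
import Mathlib
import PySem

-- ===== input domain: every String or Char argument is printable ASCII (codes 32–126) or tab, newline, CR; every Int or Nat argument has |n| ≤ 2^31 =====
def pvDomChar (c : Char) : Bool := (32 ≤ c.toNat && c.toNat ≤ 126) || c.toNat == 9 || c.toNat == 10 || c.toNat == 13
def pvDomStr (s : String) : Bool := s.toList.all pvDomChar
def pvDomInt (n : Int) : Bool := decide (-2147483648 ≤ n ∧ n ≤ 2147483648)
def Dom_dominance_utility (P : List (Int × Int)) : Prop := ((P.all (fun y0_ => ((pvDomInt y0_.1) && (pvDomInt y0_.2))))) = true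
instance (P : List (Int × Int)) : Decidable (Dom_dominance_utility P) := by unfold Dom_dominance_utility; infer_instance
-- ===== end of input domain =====

-- B replaces A's two-pointer merge loop (with in-place truncation of right_array) by a
-- single forward scan counting the leading elements of right below left[0][0]; same value, simpler.

-- ===== PORT A =====
-- the while-loop of A: state (right_array, p, q, result); the then-branch truncates right_array
def mergeA (left right : List (Int × Int)) (p q : Nat) (result : List (Int × Int)) :
    List (Int × Int) :=
  if hpq : p < left.length ∧ q < right.length then
    if (left.getD p (0, 0)).1 ≤ (right.getD q (0, 0)).1 then
      mergeA left (right.take q) (p + 1) q (result ++ [left.getD p (0, 0)])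
    else
      mergeA left right p (q + 1) (result ++ [right.getD q (0, 0)])
  else
    result ++ left.drop p ++ right.drop q
termination_by (left.length - p) + (right.length - q)
decreasing_by
  · simp only [List.length_take]; omega
  · omega

def dominance_utility (P : List (Int × Int)) : List (Int × Int) :=
  if hgt : 1 < P.length then
    let mid := P.length / 2
    let left_array := dominance_utility (P.take mid)
    let right_array := dominance_utility (P.drop mid)
    mergeA left_array right_array 0 0 []
  else P
termination_by P.length
decreasing_by
  · simp only [List.length_take]; omega
  · simp only [List.length_drop]; omega

-- ===== PORT B =====
-- the k-counting while loop of B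
def scanB (h : Int) : List (Int × Int) → Nat
  | [] => 0
  | x :: xs => if x.1 < h then scanB h xs + 1 else 0

def dominance_utility_alt (P : List (Int × Int)) : List (Int × Int) :=
  if hle : P.length ≤ 1 then P
  else
    let mid := P.length / 2
    let left := dominance_utility_alt (P.take mid)
    let right := dominance_utility_alt (P.drop mid)
    let k := scanB (left.headD (0, 0)).1 right
    right.take k ++ left
termination_by P.length
decreasing_by
  · simp only [List.length_take]; omega
  · simp only [List.length_drop]; omega

-- ===== PRECONDITION & SPEC =====
def Spec_dominance_utility (P : List (Int × Int)) (out : List (Int × Int)) : Prop := out = dominance_utility_alt P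
instance (P : List (Int × Int)) (out : List (Int × Int)) : Decidable (Spec_dominance_utility P out) := by unfold Spec_dominance_utility; infer_instance

-- ===== CLAIM (what is proved, stated in full; the proofs are below) =====
def Claim_equal_dominance_utility : Prop := ∀ (P : List (Int × Int)), Dom_dominance_utility P → Spec_dominance_utility P (dominance_utility P)

-- ===== LEMMAS AND PROOFS =====

lemma alt_ne_nil (P : List (Int × Int)) (hP : P ≠ []) : dominance_utility_alt P ≠ [] := by
  induction P using dominance_utility_alt.induct with
  | case1 P h => rw [dominance_utility_alt]; simp [h]; exact hP
  | case2 P h mid ihl ihr =>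
      rw [dominance_utility_alt, dif_neg h]
      intro hcontra
      rcases List.append_eq_nil_iff.mp hcontra with ⟨_, hl⟩
      apply ihl ?_ hl
      intro ht
      have hlen := congrArg List.length ht
      simp only [List.length_take, List.length_nil] at hlen
      omega

lemma mergeA_eq (left right : List (Int × Int)) (hl : left ≠ []) :
    ∀ n q res, right.length - q = n → q ≤ right.length →
      mergeA left right 0 q res =
        res ++ (right.drop q).take (scanB (left.headD (0, 0)).1 (right.drop q)) ++ left := by
  intro n
  induction n with
  | zero =>
      intro q res hn hq
      have hq' : q = right.length := by omega
      rw [mergeA]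
      have : ¬ (0 < left.length ∧ q < right.length) := by omega
      simp [hq', List.drop_length, scanB]
  | succ n ih =>
      intro q res hn hq
      have hq' : q < right.length := by omega
      have hdrop : right.drop q = right[q] :: right.drop (q + 1) :=
        List.drop_eq_getElem_cons hq'
      have hlpos : 0 < left.length := List.length_pos_iff.mpr hl
      rw [mergeA]
      have hc : 0 < left.length ∧ q < right.length := ⟨hlpos, hq'⟩
      rw [dif_pos hc]
      have hget : right.getD q (0, 0) = right[q] := List.getD_eq_getElem right (0,0) hq'
      have hhead : left.getD 0 (0, 0) = left.headD (0, 0) := by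
        cases left with
        | nil => exact absurd rfl hl
        | cons a l => rfl
      by_cases hcmp : (left.getD 0 (0, 0)).1 ≤ (right.getD q (0, 0)).1
      · rw [if_pos hcmp]
        -- the inner recursive call exits immediately: q = (right.take q).length
        rw [mergeA]
        have : ¬ (1 < left.length ∧ q < (right.take q).length) := by
          simp only [List.length_take]; omega
        rw [dif_neg this]
        have hscan : scanB (left.headD (0, 0)).1 (right.drop q) = 0 := by
          rw [hdrop, scanB]
          rw [hget, hhead] at hcmp
          rw [if_neg (not_lt.mpr hcmp)]
        rw [hscan]
        have hleft : left.getD 0 (0, 0) :: left.drop 1 = left := by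
          cases left with
          | nil => exact absurd rfl hl
          | cons a l => rfl
        simp
        rw [← hleft]; simp
      · rw [if_neg hcmp]
        rw [ih (q + 1) (res ++ [right.getD q (0, 0)]) (by omega) (by omega)]
        have hscan : scanB (left.headD (0, 0)).1 (right.drop q) =
            scanB (left.headD (0, 0)).1 (right.drop (q + 1)) + 1 := by
          rw [hdrop, scanB]
          rw [hget, hhead] at hcmp
          rw [if_pos (lt_of_not_ge hcmp)]
        rw [hscan, hdrop, List.take_succ_cons, hget]
        simp

lemma mergeA_zero (left right : List (Int × Int)) (hl : left ≠ []) :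
    mergeA left right 0 0 [] =
      right.take (scanB (left.headD (0, 0)).1 right) ++ left := by
  have h := mergeA_eq left right hl right.length 0 [] (by omega) (by omega)
  simpa using h

lemma dominance_eq_alt (P : List (Int × Int)) :
    dominance_utility P = dominance_utility_alt P := by
  induction P using dominance_utility.induct with
  | case1 P h mid ihl ihr =>
      rw [dominance_utility, dominance_utility_alt]
      rw [dif_pos h, dif_neg (by omega)]
      have hl : dominance_utility_alt (P.take (P.length / 2)) ≠ [] := by
        apply alt_ne_nil
        intro ht; have hlen := congrArg List.length ht
        simp only [List.length_take, List.length_nil] at hlen; omega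
      show mergeA (dominance_utility (P.take (P.length / 2)))
            (dominance_utility (P.drop (P.length / 2))) 0 0 [] =
          (dominance_utility_alt (P.drop (P.length / 2))).take
              (scanB ((dominance_utility_alt (P.take (P.length / 2))).headD (0, 0)).1
                (dominance_utility_alt (P.drop (P.length / 2)))) ++
            dominance_utility_alt (P.take (P.length / 2))
      rw [ihl, ihr, mergeA_zero _ _ hl]
  | case2 P h =>
      rw [dominance_utility, dominance_utility_alt]
      rw [dif_neg h, dif_pos (by omega)]

-- ===== VERDICT (by name: the statement is the Claim_ definition above) =====
theorem dominance_utility_spec : Claim_equal_dominance_utility := by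
  intro P _
  unfold Spec_dominance_utility
  exact dominance_eq_alt P
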